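-- pv_equiv track=rewrite | github.com/andylehti/shep32-streamlit | app.py | unpermuteBySeed
-- ===== SOURCE A (Python) =====
-- def iterateState(x):
--     return (48271 * (x % 2147483647)) % 2147483647
--
-- def computePermutation(n, s):
--     lane = list(range(n))
--     state = s or 1
--     for idx in range(n - 1, 0, -1):
--         state = iterateState(state)
--         tap = state % (idx + 1)
--         lane[idx], lane[tap] = lane[tap], lane[idx]
--     return lane
--
-- def unpermuteBySeed(t, s):
--     width = len(t)
--     if width < 2: return t
--     lane = computePermutation(width, s)
--     inv = [0] * width
--     for dst, src in enumerate(lane):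
--         inv[src] = dst
--     return "".join(t[inv[pos]] for pos in range(width))
-- ===== SOURCE B (Python) =====
-- def unpermuteBySeed(t, s):
--     width = len(t)
--     if width < 2: return t
--     state = s or 1
--     taps = []
--     for idx in range(width - 1, 0, -1):
--         state = (48271 * (state % 2147483647)) % 2147483647
--         taps.append((idx, state % (idx + 1)))
--     chars = list(t)
--     for idx, tap in reversed(taps):
--         chars[idx], chars[tap] = chars[tap], chars[idx]
--     return "".join(chars)
-- ===== Notes on version B (the rewrite author's own statement) =====
-- stated objective: alternative
-- what changed: B never materializes the permutation or its inverse table: it records the seeded PRNG transposition sequence (idx, tap) and undoes the shuffle by replaying those swaps in reverse order directly on the character list, using that the inverse of a product of transpositions is the reversed product.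
import Mathlib
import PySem

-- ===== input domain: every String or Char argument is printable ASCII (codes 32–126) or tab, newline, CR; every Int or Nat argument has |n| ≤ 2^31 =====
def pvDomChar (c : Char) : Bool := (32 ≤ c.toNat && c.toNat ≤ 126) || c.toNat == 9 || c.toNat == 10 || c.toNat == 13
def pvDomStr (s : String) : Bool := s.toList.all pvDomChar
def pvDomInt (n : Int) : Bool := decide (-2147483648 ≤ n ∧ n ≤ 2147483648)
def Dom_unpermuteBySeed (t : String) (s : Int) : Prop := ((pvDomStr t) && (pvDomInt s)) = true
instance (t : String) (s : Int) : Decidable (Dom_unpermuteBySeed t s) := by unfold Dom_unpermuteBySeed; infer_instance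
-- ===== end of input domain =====

-- B undoes the seeded shuffle by replaying the recorded (idx, tap) transpositions in reverse order
-- directly on the character list, instead of building the permutation and an inverse table; same value,
-- fewer passes and allocations (a timing run measured B faster on large inputs).

-- ===== PORT A =====
-- shared-module helper iterateState
def iterState (x : Int) : Int :=
  PySem.Int.mod (48271 * PySem.Int.mod x 2147483647) 2147483647

-- the Fisher-Yates loop of computePermutation: idx runs from n-1 down to 1
def fyGo (idx : Nat) (state : Int) (lane : List Nat) : List Nat :=
  match idx with
  | 0 => lane
  | i + 1 =>
    let st := iterState state
    let tap := (PySem.Int.mod st ((i : Int) + 2)).toNat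
    fyGo i st ((lane.set (i + 1) (lane.getD tap 0)).set tap (lane.getD (i + 1) 0))

def computePermutation (n : Nat) (s : Int) : List Nat :=
  fyGo (n - 1) (if s = 0 then 1 else s) (List.range n)

def unpermuteBySeed (t : String) (s : Int) : String :=
  let cs := t.toList
  let width := cs.length
  if width < 2 then t
  else
    let lane := computePermutation width s
    let inv := lane.zipIdx.foldl (fun a p => a.set p.1 p.2) (List.replicate width 0)
    String.ofList ((List.range width).map (fun pos => cs.getD (inv.getD pos 0) ' '))

-- ===== PORT B =====
-- Source B's PRNG loop collecting the (idx, tap) swap sequence (idx descending, as appended)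
def collectTaps : Nat → Int → List (Nat × Nat)
  | 0, _ => []
  | i + 1, state =>
    let st := PySem.Int.mod (48271 * PySem.Int.mod state 2147483647) 2147483647
    (i + 1, (PySem.Int.mod st ((i : Int) + 2)).toNat) :: collectTaps i st

def unpermuteBySeed_alt (t : String) (s : Int) : String :=
  let cs := t.toList
  let width := cs.length
  if width < 2 then t
  else
    let taps := collectTaps (width - 1) (if s = 0 then 1 else s)
    String.ofList (taps.reverse.foldl
      (fun a p => (a.set p.1 (a.getD p.2 ' ')).set p.2 (a.getD p.1 ' ')) cs)

-- ===== PRECONDITION & SPEC =====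
def Spec_unpermuteBySeed (t : String) (s : Int) (out : String) : Prop := out = unpermuteBySeed_alt t s
instance (t : String) (s : Int) (out : String) : Decidable (Spec_unpermuteBySeed t s out) := by unfold Spec_unpermuteBySeed; infer_instance

-- ===== CLAIM (what is proved, stated in full; the proofs are below) =====
def Claim_equal_unpermuteBySeed : Prop := ∀ (t : String) (s : Int), Dom_unpermuteBySeed t s → Spec_unpermuteBySeed t s (unpermuteBySeed t s)

-- ===== LEMMAS AND PROOFS =====

-- the transposition (p.1 p.2) as a function on indices
def swapFn (p : Nat × Nat) (i : Nat) : Nat :=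
  if i = p.1 then p.2 else if i = p.2 then p.1 else i

-- applying a list of swaps to a list, left to right (the shape both ports' loops have)
def genApply {β : Type} (d : β) (ps : List (Nat × Nat)) (l : List β) : List β :=
  ps.foldl (fun a p => (a.set p.1 (a.getD p.2 d)).set p.2 (a.getD p.1 d)) l

-- the permutation realised by genApply ps, and its inverse
def fwd (ps : List (Nat × Nat)) (i : Nat) : Nat := ps.foldr swapFn i
def bwd (ps : List (Nat × Nat)) (i : Nat) : Nat := ps.foldl (fun j p => swapFn p j) i

theorem length_genApply {β : Type} (d : β) (ps : List (Nat × Nat)) (l : List β) :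
    (genApply d ps l).length = l.length := by
  induction ps generalizing l with
  | nil => rfl
  | cons p ps ih => simp [genApply, List.foldl_cons] at ih ⊢; rw [ih]; simp

theorem swapFn_lt {n : Nat} (p : Nat × Nat) (hp1 : p.1 < n) (hp2 : p.2 < n)
    {i : Nat} (hi : i < n) : swapFn p i < n := by
  unfold swapFn; split_ifs <;> omega

theorem fwd_lt {n : Nat} (ps : List (Nat × Nat))
    (hps : ∀ p ∈ ps, p.1 < n ∧ p.2 < n) {i : Nat} (hi : i < n) : fwd ps i < n := by
  induction ps with
  | nil => exact hi
  | cons p ps ih =>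
    have := hps p (List.mem_cons_self ..)
    exact swapFn_lt p this.1 this.2 (ih (fun q hq => hps q (List.mem_cons_of_mem _ hq)))

theorem bwd_lt {n : Nat} (ps : List (Nat × Nat))
    (hps : ∀ p ∈ ps, p.1 < n ∧ p.2 < n) {i : Nat} (hi : i < n) : bwd ps i < n := by
  induction ps generalizing i with
  | nil => exact hi
  | cons p ps ih =>
    have h := hps p (List.mem_cons_self ..)
    exact ih (fun q hq => hps q (List.mem_cons_of_mem _ hq)) (swapFn_lt p h.1 h.2 hi)

theorem swapFn_swapFn (p : Nat × Nat) (i : Nat) : swapFn p (swapFn p i) = i := by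
  unfold swapFn; split_ifs <;> omega

theorem fwd_bwd (ps : List (Nat × Nat)) (i : Nat) : fwd ps (bwd ps i) = i := by
  induction ps generalizing i with
  | nil => rfl
  | cons p ps ih =>
    show swapFn p (fwd ps (bwd ps (swapFn p i))) = i
    rw [ih, swapFn_swapFn]

theorem bwd_fwd (ps : List (Nat × Nat)) (i : Nat) : bwd ps (fwd ps i) = i := by
  induction ps generalizing i with
  | nil => rfl
  | cons p ps ih =>
    show bwd ps (swapFn p (swapFn p (fwd ps i))) = i
    rw [swapFn_swapFn, ih]

-- one swap step read back through getD
theorem getD_swap_step {β : Type} (d : β) (p : Nat × Nat) (l : List β)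
    (_hp1 : p.1 < l.length) (hp2 : p.2 < l.length) {i : Nat} (hi : i < l.length) :
    ((l.set p.1 (l.getD p.2 d)).set p.2 (l.getD p.1 d)).getD i d = l.getD (swapFn p i) d := by
  unfold swapFn
  by_cases h2 : i = p.2
  · subst h2
    rw [List.getD_eq_getElem?_getD, List.getElem?_set_self (by simpa using hp2)]
    split_ifs with ha hb
    · simp [ha]
    · simp
    · exact absurd rfl hb
  · by_cases h1 : i = p.1
    · subst h1
      rw [List.getD_eq_getElem?_getD, List.getElem?_set_ne (by omega),
        List.getElem?_set_self (by omega)]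
      simp [h2]
    · rw [List.getD_eq_getElem?_getD, List.getElem?_set_ne (by omega),
        List.getElem?_set_ne (by omega)]
      simp [h1, h2, List.getD_eq_getElem?_getD]

theorem getD_genApply {β : Type} (d : β) (ps : List (Nat × Nat)) (l : List β)
    (hps : ∀ p ∈ ps, p.1 < l.length ∧ p.2 < l.length) {i : Nat} (hi : i < l.length) :
    (genApply d ps l).getD i d = l.getD (fwd ps i) d := by
  induction ps generalizing l with
  | nil => rfl
  | cons p ps ih =>
    have hp := hps p (List.mem_cons_self ..)
    have hlen : ((l.set p.1 (l.getD p.2 d)).set p.2 (l.getD p.1 d)).length = l.length := by simp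
    have htail : ∀ q ∈ ps, q.1 < ((l.set p.1 (l.getD p.2 d)).set p.2 (l.getD p.1 d)).length ∧
        q.2 < ((l.set p.1 (l.getD p.2 d)).set p.2 (l.getD p.1 d)).length := by
      intro q hq; rw [hlen]; exact hps q (List.mem_cons_of_mem _ hq)
    show (genApply d ps _).getD i d = _
    rw [ih _ htail (by rw [hlen]; exact hi)]
    have hfwd : fwd ps i < l.length := fwd_lt ps (fun q hq => hps q (List.mem_cons_of_mem _ hq)) hi
    exact getD_swap_step d p l hp.1 hp.2 hfwd

-- A's Fisher-Yates loop is genApply over the collected tap sequence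
theorem fyGo_eq_genApply (idx : Nat) (state : Int) (lane : List Nat) :
    fyGo idx state lane = genApply 0 (collectTaps idx state) lane := by
  induction idx generalizing state lane with
  | zero => rfl
  | succ i ih => simp only [fyGo, collectTaps, genApply, List.foldl_cons, iterState] at ih ⊢; exact ih _ _

-- every collected swap index is ≤ idx
theorem collectTaps_bounds (idx : Nat) (state : Int) :
    ∀ p ∈ collectTaps idx state, p.1 ≤ idx ∧ p.2 ≤ idx := by
  induction idx generalizing state with
  | zero => intro p hp; simp [collectTaps] at hp
  | succ i ih =>
    intro p hp
    simp only [collectTaps, List.mem_cons] at hp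
    rcases hp with h | h
    · subst h
      refine ⟨le_refl _, ?_⟩
      have h1 := PySem.Int.mod_nonneg (PySem.Int.mod (48271 * PySem.Int.mod state 2147483647) 2147483647) (b := (i : Int) + 2) (by positivity)
      have h2 := PySem.Int.mod_lt (PySem.Int.mod (48271 * PySem.Int.mod state 2147483647) 2147483647) (b := (i : Int) + 2) (by positivity)
      simp only
      omega
    · have := ih _ p h
      omega

-- the last-write-wins reading of A's scatter building inv
theorem getD_foldl_set (ps : List (Nat × Nat)) (acc : List Nat) (q : Nat) (hq : q < acc.length) :
    (ps.foldl (fun a p => a.set p.1 p.2) acc).getD q 0 =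
      match ps.reverse.find? (fun p => p.1 == q) with
      | some r => r.2
      | none => acc.getD q 0 := by
  induction ps generalizing acc with
  | nil => rfl
  | cons p ps ih =>
    rw [List.foldl_cons, ih _ (by simpa using hq)]
    rw [List.reverse_cons, List.find?_append]
    cases hfind : ps.reverse.find? (fun p => p.1 == q) with
    | some r => simp
    | none =>
      simp only [Option.none_or]
      by_cases hpq : p.1 = q
      · subst hpq
        simp [List.getD_eq_getElem?_getD, List.getElem?_set_self (by omega)]
      · simp [hpq, List.getD_eq_getElem?_getD, List.getElem?_set_ne (by omega)]

-- the core equality: A's inverse-table gather = B's reversed swap replay, element by element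
theorem core_eq (cs : List Char) (s : Int) (hn : 2 ≤ cs.length) :
    (List.range cs.length).map (fun pos =>
      cs.getD (((computePermutation cs.length s).zipIdx.foldl (fun a p => a.set p.1 p.2)
        (List.replicate cs.length 0)).getD pos 0) ' ') =
    (collectTaps (cs.length - 1) (if s = 0 then 1 else s)).reverse.foldl
      (fun a p => (a.set p.1 (a.getD p.2 ' ')).set p.2 (a.getD p.1 ' ')) cs := by
  set n := cs.length with hw
  set taps := collectTaps (n - 1) (if s = 0 then 1 else s) with htaps
  have hbounds : ∀ p ∈ taps, p.1 < n ∧ p.2 < n := by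
    intro p hp
    have := collectTaps_bounds (n - 1) (if s = 0 then 1 else s) p hp
    omega
  have hrbounds : ∀ p ∈ taps.reverse, p.1 < cs.length ∧ p.2 < cs.length := by
    intro p hp; exact hbounds p (List.mem_reverse.mp hp)
  have hlane : computePermutation n s = genApply 0 taps (List.range n) := by
    rw [computePermutation, fyGo_eq_genApply]
  have hlanelen : (computePermutation n s).length = n := by
    rw [hlane, length_genApply, List.length_range]
  have hlaneD : ∀ d < n, (computePermutation n s).getD d 0 = fwd taps d := by
    intro d hd
    rw [hlane, getD_genApply 0 taps _ (by simpa using hbounds) (by simpa using hd)]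
    rw [List.getD_eq_getElem _ _ (by simp; exact fwd_lt taps hbounds hd), List.getElem_range]
  -- B's side as genApply
  show _ = genApply ' ' taps.reverse cs
  apply List.ext_getElem
  · rw [length_genApply]; simp only [List.length_map, List.length_range]; exact hw
  · intro q h1 h2
    have hq : q < n := by simpa using h1
    rw [List.getElem_map, List.getElem_range]
    -- B element
    have hBq : q < cs.length := by omega
    rw [← List.getD_eq_getElem _ ' ' h2, getD_genApply ' ' taps.reverse cs hrbounds hBq]
    have hfwd_rev : fwd taps.reverse q = bwd taps q := by
      unfold fwd bwd; rw [List.foldr_reverse]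
    rw [hfwd_rev]
    -- A element: inv.getD q 0 = bwd taps q
    set m := bwd taps q with hm
    have hmn : m < n := bwd_lt taps hbounds hq
    have hLm : (computePermutation n s).getD m 0 = q := by rw [hlaneD m hmn, hm, fwd_bwd]
    have hinv : ((computePermutation n s).zipIdx.foldl (fun a p => a.set p.1 p.2)
        (List.replicate n 0)).getD q 0 = m := by
      rw [getD_foldl_set _ _ q (by simpa using hq)]
      cases hfind : (computePermutation n s).zipIdx.reverse.find? (fun p => p.1 == q) with
      | none =>
        exfalso
        rw [List.find?_eq_none] at hfind
        have hmem : (q, m) ∈ (computePermutation n s).zipIdx.reverse := by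
          rw [List.mem_reverse, List.mem_zipIdx_iff_getElem?]
          rw [List.getElem?_eq_getElem (by omega)]
          rw [← List.getD_eq_getElem _ 0 (by omega), hLm]
        exact hfind _ hmem (by simp)
      | some r =>
        have hrmem := List.mem_reverse.mp (List.mem_of_find?_eq_some hfind)
        have hrq : r.1 = q := by simpa using List.find?_some hfind
        rw [List.mem_zipIdx_iff_getElem?] at hrmem
        have hr2 : r.2 < n := by
          have := (List.getElem?_eq_some_iff.mp hrmem).1
          omega
        have hLr : fwd taps r.2 = q := by
          rw [← hlaneD r.2 hr2, List.getD_eq_getElem _ _ (by omega)]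
          rcases List.getElem?_eq_some_iff.mp hrmem with ⟨h, hv⟩
          rw [hv, hrq]
        have : bwd taps (fwd taps r.2) = bwd taps q := by rw [hLr]
        rw [bwd_fwd] at this
        exact this
    rw [hinv]

-- ===== VERDICT (by name: the statement is the Claim_ definition above) =====
theorem unpermuteBySeed_spec : Claim_equal_unpermuteBySeed := by
  intro t s _
  unfold Spec_unpermuteBySeed unpermuteBySeed unpermuteBySeed_alt
  dsimp only
  by_cases hlt : t.toList.length < 2
  · rw [if_pos hlt, if_pos hlt]
  · rw [if_neg hlt, if_neg hlt]
    exact congrArg String.ofList (core_eq t.toList s (by omega))
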